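-- pv_equiv track=rewrite | github.com/Janewu1128/EyeTracking | eyetracking.py | calculate_range
-- ===== SOURCE A (Python) =====
-- def calculate_range(pupil_positions):
--     if len(pupil_positions) > 1:
--         x_positions = [p[0] for p in pupil_positions]
--         y_positions = [p[1] for p in pupil_positions]
--         x_range = max(x_positions) - min(x_positions)
--         y_range = max(y_positions) - min(y_positions)
--         return x_range, y_range
--     return 0, 0
-- ===== SOURCE B (Python) =====
-- def calculate_range(pupil_positions):
--     if len(pupil_positions) <= 1:
--         return 0, 0
--     min_x = max_x = pupil_positions[0][0]
--     min_y = max_y = pupil_positions[0][1]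
--     for x, y in pupil_positions:
--         if x < min_x:
--             min_x = x
--         if x > max_x:
--             max_x = x
--         if y < min_y:
--             min_y = y
--         if y > max_y:
--             max_y = y
--     return max_x - min_x, max_y - min_y
-- ===== Notes on version B (the rewrite author's own statement) =====
-- stated objective: alternative
-- what changed: Replaces the two intermediate coordinate lists and four separate max/min scans with a single pass that maintains four running extremes.
import Mathlib
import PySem

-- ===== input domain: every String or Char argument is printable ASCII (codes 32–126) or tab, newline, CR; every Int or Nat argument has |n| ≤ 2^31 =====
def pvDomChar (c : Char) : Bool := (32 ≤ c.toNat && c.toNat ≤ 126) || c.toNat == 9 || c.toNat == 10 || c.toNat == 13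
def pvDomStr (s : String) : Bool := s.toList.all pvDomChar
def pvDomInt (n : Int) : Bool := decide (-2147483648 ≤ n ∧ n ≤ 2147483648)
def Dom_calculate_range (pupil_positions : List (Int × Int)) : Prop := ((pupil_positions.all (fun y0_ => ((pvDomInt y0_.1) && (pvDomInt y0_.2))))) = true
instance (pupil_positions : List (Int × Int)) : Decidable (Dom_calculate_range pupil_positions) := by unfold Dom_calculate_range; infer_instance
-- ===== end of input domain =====

-- B replaces A's two temporary coordinate lists and four max/min scans with one pass keeping four running extremes (objective: alternative; same O(n) cost).
-- ===== PORT A =====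
def calculate_range (pupil_positions : List (Int × Int)) : Int × Int :=
  if pupil_positions.length > 1 then
    let x_positions := pupil_positions.map (fun p => p.1)
    let y_positions := pupil_positions.map (fun p => p.2)
    -- the guard makes the lists nonempty, so max?/min? are `some`; getD 0 is never the default
    let x_range := (PySem.List.max? x_positions (fun y => y)).getD 0 - (PySem.List.min? x_positions (fun y => y)).getD 0
    let y_range := (PySem.List.max? y_positions (fun y => y)).getD 0 - (PySem.List.min? y_positions (fun y => y)).getD 0
    (x_range, y_range)
  else (0, 0)

-- ===== PORT B =====
-- B's single loop over the positions, updating the four running extremes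
def crLoop : List (Int × Int) → Int → Int → Int → Int → Int × Int
  | [], min_x, max_x, min_y, max_y => (max_x - min_x, max_y - min_y)
  | (x, y) :: t, min_x, max_x, min_y, max_y =>
    crLoop t (if x < min_x then x else min_x) (if x > max_x then x else max_x)
             (if y < min_y then y else min_y) (if y > max_y then y else max_y)

def calculate_range_alt (pupil_positions : List (Int × Int)) : Int × Int :=
  if pupil_positions.length ≤ 1 then (0, 0)
  else
    match pupil_positions with
    | [] => (0, 0)   -- unreachable under the guard
    | (x0, y0) :: _ => crLoop pupil_positions x0 x0 y0 y0

-- ===== PRECONDITION & SPEC =====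
def Spec_calculate_range (pupil_positions : List (Int × Int)) (out : Int × Int) : Prop := out = calculate_range_alt pupil_positions
instance (pupil_positions : List (Int × Int)) (out : Int × Int) : Decidable (Spec_calculate_range pupil_positions out) := by unfold Spec_calculate_range; infer_instance

-- ===== CLAIM (what is proved, stated in full; the proofs are below) =====
def Claim_equal_calculate_range : Prop := ∀ (pupil_positions : List (Int × Int)), Dom_calculate_range pupil_positions → Spec_calculate_range pupil_positions (calculate_range pupil_positions)

-- ===== LEMMAS AND PROOFS =====

lemma crLoop_eq (t : List (Int × Int)) : ∀ (mnx mxx mny mxy : Int),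
    crLoop t mnx mxx mny mxy =
      ((t.map Prod.fst).foldl max mxx - (t.map Prod.fst).foldl min mnx,
       (t.map Prod.snd).foldl max mxy - (t.map Prod.snd).foldl min mny) := by
  induction t with
  | nil => intro _ _ _ _; rfl
  | cons p t ih =>
    intro mnx mxx mny mxy
    obtain ⟨x, y⟩ := p
    simp only [crLoop, ih, List.map_cons, List.foldl_cons]
    have h1 : (if x < mnx then x else mnx) = min mnx x := by rw [min_def]; split_ifs <;> omega
    have h2 : (if x > mxx then x else mxx) = max mxx x := by rw [max_def]; split_ifs <;> omega
    have h3 : (if y < mny then y else mny) = min mny y := by rw [min_def]; split_ifs <;> omega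
    have h4 : (if y > mxy then y else mxy) = max mxy y := by rw [max_def]; split_ifs <;> omega
    rw [h1, h2, h3, h4]

-- ===== VERDICT =====
theorem calculate_range_spec : Claim_equal_calculate_range := by
  intro ps _
  unfold Spec_calculate_range calculate_range calculate_range_alt
  match ps with
  | [] => rfl
  | [p] => rfl
  | (x0, y0) :: q :: t =>
    rw [if_pos (by simp), if_neg (by simp)]
    simp only [List.map_cons, PySem.List.max?_id_cons, PySem.List.min?_id_cons,
      Option.getD_some, crLoop, crLoop_eq, lt_irrefl, gt_iff_lt, if_false, List.foldl_cons]
    have e1 : (if q.1 > x0 then q.1 else x0) = max x0 q.1 := by rw [max_def]; split_ifs <;> omega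
    have e2 : (if q.1 < x0 then q.1 else x0) = min x0 q.1 := by rw [min_def]; split_ifs <;> omega
    have e3 : (if q.2 > y0 then q.2 else y0) = max y0 q.2 := by rw [max_def]; split_ifs <;> omega
    have e4 : (if q.2 < y0 then q.2 else y0) = min y0 q.2 := by rw [min_def]; split_ifs <;> omega
    rw [e1, e2, e3, e4]
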